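-- pv_equiv track=rewrite | github.com/UWPCE-PythonCert/IntroPython-2017 | students/kegan/session04/grammer.py | textify
-- ===== SOURCE A (Python) =====
-- def is_punctuation(char):
--     """ Returns true if the character is a type of allowed
--     punctuation.
--     Args:
--         char (str) : character to evaluate
--     Returns:
--         bool : True if character is allowed punctuation, False otherwise
--     """
--     return char in ('\\', '?', '!', ':', ';', '.', ',')
--
-- def textify(tokens):
--     """ Formats the given tokens and returns them as text.
--     Args:
--         tokens (list of str) : tokens to format
--     Returns:
--         str : formatted tokens as string
--     """
--     output = []
--     prev = ''
--     start = True
--     for token in tokens: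
--         token = token.replace('newparagraph', '\n\n')
--         token = token.replace('_', ' ')
--         # remove preceding whitespace when token is a type of punctuation
--         output = output[:-1] if is_punctuation(token) else output
--         token = \
--             token.capitalize()\
--             if capital(start, prev, token) else token
--         start = False
--         output.append(token)
--         output.append(get_buffer(token))
--         prev = token
--     output = ''.join(output).strip()
--     return output
--
-- def capital(start, prev, token):
--     """ Returns True if given token should be capitalized.
--     Args:
--         start (bool) : start of text
--         prev (str) : previous token
--         token (str) : current token
--     Returns:
--         bool : True if token should be capitalized, False otherwise
--     """
--     cap_next = ('.', '?', '!', '\n\n')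
--     return start or prev in cap_next
--
-- def get_buffer(token):
--     """ Returns appropriate following character for given token.
--     Args:
--         token (str) : token to assess
--     Returns:
--         str : buffering character post-token
--     """
--     if token == '...':
--         return '\n\n'
--     elif token == '\n\n':
--         return ''
--     return ' '
-- ===== SOURCE B (Python) =====
-- CAP_AFTER = ('.', '?', '!', '\n\n')
-- PUNCT = ('\\', '?', '!', ':', ';', '.', ',')
--
--
-- def _sep(prev):
--     """Separator printed between prev and a following word."""
--     return '\n\n' if prev == '...' else '' if prev == '\n\n' else ' '
--
--
-- def textify(tokens):
--     """Two staged passes: normalize every token first, then emit each token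
--     with a LEADING separator computed from its predecessor via zip, so no
--     trailing buffer is ever appended or retroactively deleted.  Correct
--     because capitalize() only changes letter case, hence never affects the
--     comparisons with the letterless strings in CAP_AFTER/PUNCT/'...'."""
--     norm = [t.replace('newparagraph', '\n\n').replace('_', ' ') for t in tokens]
--     pieces = []
--     for prev, tok in zip((None,) + tuple(norm), norm):
--         word = tok.capitalize() if prev is None or prev in CAP_AFTER else tok
--         if prev is not None and tok not in PUNCT:
--             pieces.append(_sep(prev))
--         pieces.append(word)
--     return ''.join(pieces).strip()
-- ===== Notes on version B (the rewrite author's own statement) =====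
-- stated objective: simpler
-- what changed: B is two staged passes: a first pass normalizes all tokens, then a zip of each token with its predecessor emits a leading separator per token, replacing A's single-pass trailing-buffer state machine with its retroactive output[:-1] deletion; correctness rests on capitalize() never affecting comparisons with the letterless punctuation strings, so the predecessor can be the normalized (uncapitalized) token.
import Mathlib
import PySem

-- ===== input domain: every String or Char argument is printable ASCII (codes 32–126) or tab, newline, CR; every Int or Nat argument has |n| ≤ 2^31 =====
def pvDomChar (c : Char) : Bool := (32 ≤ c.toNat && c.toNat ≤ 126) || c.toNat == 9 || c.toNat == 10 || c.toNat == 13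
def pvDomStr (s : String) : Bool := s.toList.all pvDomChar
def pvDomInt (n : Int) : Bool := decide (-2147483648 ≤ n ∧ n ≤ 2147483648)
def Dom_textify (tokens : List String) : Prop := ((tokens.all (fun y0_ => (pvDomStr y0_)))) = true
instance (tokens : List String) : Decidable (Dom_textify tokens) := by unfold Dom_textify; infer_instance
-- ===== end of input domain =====

-- B is two staged passes (normalize all tokens, then emit each with a LEADING separator
-- computed from its predecessor via zip) instead of A's trailing-buffer-then-delete
-- single-pass state machine; objective: simpler, same cost.

-- str.capitalize(): first char uppercased, rest lowercased (exact on the ASCII domain,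
-- where Python's title-casing of the first character coincides with uppercasing);
-- shared by both ports because both Pythons call the same built-in.
def pvCapitalize (s : String) : String :=
  String.ofList (match s.toList with
    | [] => []
    | c :: cs => PySem.Chars.upperChar c :: cs.map PySem.Chars.lowerChar)

-- ===== PORT A =====
def pvIsPunctuation (char : String) : Bool :=
  char == "\\" || char == "?" || char == "!" || char == ":" ||
  char == ";" || char == "." || char == ","

def pvCapital (start : Bool) (prev _token : String) : Bool :=
  start || (prev == "." || prev == "?" || prev == "!" || prev == "\n\n")

def pvGetBuffer (token : String) : String :=
  if token == "..." then "\n\n"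
  else if token == "\n\n" then ""
  else " "

def pvStepA (st : List String × String × Bool) (token : String) : List String × String × Bool :=
  let token := PySem.Str.replace token "newparagraph" "\n\n"
  let token := PySem.Str.replace token "_" " "
  -- output = output[:-1] if is_punctuation(token) else output
  let output := if pvIsPunctuation token then PySem.List.slice st.1 none (some (-1)) else st.1
  let token := if pvCapital st.2.2 st.2.1 token then pvCapitalize token else token
  (output ++ [token, pvGetBuffer token], token, false)

def textify (tokens : List String) : String :=
  PySem.Str.strip (PySem.Str.join "" (tokens.foldl pvStepA ([], "", true)).1)

-- ===== PORT B =====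
-- Source B's _sep helper
def pvSepB (prev : String) : String :=
  if prev == "..." then "\n\n" else if prev == "\n\n" then "" else " "

-- the normalization comprehension body
def pvNormB (t : String) : String :=
  PySem.Str.replace (PySem.Str.replace t "newparagraph" "\n\n") "_" " "

-- the body of Source B's zip loop: pieces contributed for one (prev, tok) pair
def pvPieceB (pt : Option String × String) : List String :=
  match pt with
  | (none, tok) => [pvCapitalize tok]
  | (some prev, tok) =>
    let word := if prev == "." || prev == "?" || prev == "!" || prev == "\n\n"
                then pvCapitalize tok else tok
    if tok == "\\" || tok == "?" || tok == "!" || tok == ":" ||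
       tok == ";" || tok == "." || tok == ","
    then [word]
    else [pvSepB prev, word]

def textify_alt (tokens : List String) : String :=
  let norm := tokens.map pvNormB
  PySem.Str.strip (PySem.Str.join ""
    (((none :: norm.map some).zip norm).flatMap pvPieceB))

-- ===== PRECONDITION & SPEC =====
def Spec_textify (tokens : List String) (out : String) : Prop := out = textify_alt tokens
instance (tokens : List String) (out : String) : Decidable (Spec_textify tokens out) := by unfold Spec_textify; infer_instance

-- ===== CLAIM (what is proved, stated in full; the proofs are below) =====
def Claim_equal_textify : Prop := ∀ (tokens : List String), Dom_textify tokens → Spec_textify tokens (textify tokens)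

-- ===== LEMMAS AND PROOFS =====

-- "if b then capitalized else plain": the shape of A's running prev
def pvCapb (b : Bool) (s : String) : String := if b then pvCapitalize s else s

-- B's zip loop, unrolled to a recursion on the tail (proof artifact)
def pvRecB (p : String) : List String → List String
  | [] => []
  | t :: ts => pvPieceB (some p, t) ++ pvRecB t ts

-- flattened character content of a list of strings
def pvFlat (xs : List String) : List Char := (xs.map String.toList).flatten

lemma pv_join_eq_flat (xs : List String) :
    (PySem.Str.join "" xs).toList = pvFlat xs := by
  simp [PySem.Str.join, pvFlat, PySem.Chars.join, List.intercalate]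
  induction xs with
  | nil => simp
  | cons x t ih => cases t <;> simp_all

lemma pv_flat_append (xs ys : List String) : pvFlat (xs ++ ys) = pvFlat xs ++ pvFlat ys := by
  simp [pvFlat]

-- letterless characters: only they map to themselves under case changes
lemma pv_islower_iff (c : Char) : PySem.Chars.islower c = true ↔ 97 ≤ c.toNat ∧ c.toNat ≤ 122 := by
  rw [PySem.Chars.islower, Bool.and_eq_true, decide_eq_true_iff, decide_eq_true_iff,
    Char.le_def, Char.le_def, UInt32.le_iff_toNat_le, UInt32.le_iff_toNat_le]
  rfl

lemma pv_isupper_iff (c : Char) : PySem.Chars.isupper c = true ↔ 65 ≤ c.toNat ∧ c.toNat ≤ 90 := by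
  rw [PySem.Chars.isupper, Bool.and_eq_true, decide_eq_true_iff, decide_eq_true_iff,
    Char.le_def, Char.le_def, UInt32.le_iff_toNat_le, UInt32.le_iff_toNat_le]
  rfl

lemma pv_toNat_ofNat (n : Nat) (h : n.isValidChar) : (Char.ofNat n).toNat = n := by
  simp [Char.ofNat, h, Char.toNat, Char.ofNatAux]

lemma pv_upper_eq_iff (c d : Char)
    (hd : (PySem.Chars.isupper d || PySem.Chars.islower d) = false) :
    PySem.Chars.upperChar c = d ↔ c = d := by
  unfold PySem.Chars.upperChar
  by_cases hc : PySem.Chars.islower c = true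
  · simp only [hc, if_true]
    have hcn := (pv_islower_iff c).mp hc
    constructor
    · intro h
      exfalso
      have hv : (c.toNat - 32).isValidChar := Or.inl (by omega)
      have : d.toNat = c.toNat - 32 := by rw [← h, pv_toNat_ofNat _ hv]
      have : PySem.Chars.isupper d = true := (pv_isupper_iff d).mpr (by omega)
      simp [this] at hd
    · intro h; subst h
      simp [hc] at hd
  · simp [hc]

lemma pv_lower_eq_iff (c d : Char)
    (hd : (PySem.Chars.isupper d || PySem.Chars.islower d) = false) :
    PySem.Chars.lowerChar c = d ↔ c = d := by
  unfold PySem.Chars.lowerChar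
  by_cases hc : PySem.Chars.isupper c = true
  · simp only [hc, if_true]
    have hcn := (pv_isupper_iff c).mp hc
    constructor
    · intro h
      exfalso
      have hv : (c.toNat + 32).isValidChar := Or.inl (by omega)
      have : d.toNat = c.toNat + 32 := by rw [← h, pv_toNat_ofNat _ hv]
      have : PySem.Chars.islower d = true := (pv_islower_iff d).mpr (by omega)
      simp [this] at hd
    · intro h; subst h
      simp [hc] at hd
  · simp [hc]

lemma pv_map_lower_eq_iff (cs ds : List Char)
    (hd : ds.all (fun d => !(PySem.Chars.isupper d || PySem.Chars.islower d)) = true) :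
    cs.map PySem.Chars.lowerChar = ds ↔ cs = ds := by
  induction cs generalizing ds with
  | nil => cases ds <;> simp
  | cons c cs ih =>
    cases ds with
    | nil => simp
    | cons d ds =>
      simp only [List.all_cons, Bool.and_eq_true, Bool.not_eq_eq_eq_not, Bool.not_true] at hd
      simp only [List.map_cons, List.cons.injEq, ih ds hd.2,
        pv_lower_eq_iff c d hd.1]

lemma pv_capL_eq_iff (l m : List Char)
    (hm : m.all (fun d => !(PySem.Chars.isupper d || PySem.Chars.islower d)) = true) :
    (match l with
      | [] => ([] : List Char)
      | c :: cs => PySem.Chars.upperChar c :: cs.map PySem.Chars.lowerChar) = m ↔ l = m := by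
  cases l with
  | nil => simp
  | cons c cs =>
    cases m with
    | nil => simp
    | cons d ds =>
      simp only [List.all_cons, Bool.and_eq_true, Bool.not_eq_eq_eq_not, Bool.not_true] at hm
      simp only [List.cons.injEq, pv_upper_eq_iff c d hm.1, pv_map_lower_eq_iff cs ds hm.2]

lemma pv_cap_eq_iff (p s0 : String)
    (h : s0.toList.all (fun d => !(PySem.Chars.isupper d || PySem.Chars.islower d)) = true) :
    pvCapitalize p = s0 ↔ p = s0 := by
  have hinj : ∀ a b : String, a = b ↔ a.toList = b.toList :=
    fun a b => ⟨fun hh => by rw [hh], fun hh => by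
      rw [← @String.ofList_toList a, hh, @String.ofList_toList b]⟩
  rw [hinj (pvCapitalize p) s0, hinj p s0, pvCapitalize, String.toList_ofList]
  exact pv_capL_eq_iff p.toList s0.toList h

lemma pv_cap_beq (p s0 : String)
    (h : s0.toList.all (fun d => !(PySem.Chars.isupper d || PySem.Chars.islower d)) = true) :
    (pvCapitalize p == s0) = (p == s0) := by
  by_cases hp : p = s0
  · subst hp; simp [(pv_cap_eq_iff p p h).mpr rfl]
  · have hc : ¬ pvCapitalize p = s0 := fun hc => hp ((pv_cap_eq_iff p s0 h).mp hc)
    simp [hp, hc]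

lemma pv_buf_capb (b : Bool) (t : String) :
    pvGetBuffer (pvCapb b t) = pvGetBuffer t := by
  cases b with
  | false => rfl
  | true =>
    simp only [pvCapb, if_true, pvGetBuffer,
      pv_cap_beq t "..." (by decide), pv_cap_beq t "\n\n" (by decide)]

lemma pv_capital_capb (b : Bool) (p x : String) :
    pvCapital false (pvCapb b p) x =
      (p == "." || p == "?" || p == "!" || p == "\n\n") := by
  cases b with
  | false => rfl
  | true =>
    simp only [pvCapb, if_true, pvCapital, Bool.false_or,
      pv_cap_beq p "." (by decide), pv_cap_beq p "?" (by decide),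
      pv_cap_beq p "!" (by decide), pv_cap_beq p "\n\n" (by decide)]

lemma pv_buffer_ws (t : String) : ∀ c ∈ (pvGetBuffer t).toList, PySem.Chars.isspace c = true := by
  unfold pvGetBuffer
  split_ifs <;> intro c hc <;> simp at hc <;> subst hc <;> decide

lemma pv_rstrip_append_ws (l w : List Char)
    (hw : ∀ c ∈ w, PySem.Chars.isspace c = true) :
    PySem.Chars.rstrip (l ++ w) = PySem.Chars.rstrip l := by
  simp only [PySem.Chars.rstrip, List.reverse_append]
  rw [List.dropWhile_append, List.dropWhile_eq_nil_iff.mpr (by simpa using fun c hc => hw c hc)]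
  simp

lemma pv_strip_append_ws (l w : List Char)
    (hw : ∀ c ∈ w, PySem.Chars.isspace c = true) :
    PySem.Chars.strip (l ++ w) = PySem.Chars.strip l := by
  simp only [PySem.Chars.strip, PySem.Chars.lstrip]
  rw [List.dropWhile_append]
  by_cases h : (List.dropWhile PySem.Chars.isspace l).isEmpty
  · simp [List.dropWhile_eq_nil_iff.mpr hw, List.isEmpty_iff.mp h, PySem.Chars.rstrip]
  · simp only [h]
    simp [pv_rstrip_append_ws _ w hw]

lemma pv_slice_dropLast (xs : List String) :
    PySem.List.slice xs none (some (-1)) = xs.dropLast := by simp [pysem]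

-- B's zip, unrolled once the first token is consumed
lemma pv_zip_eq_recB (l : List String) (p : String) :
    ((some p :: l.map some).zip l).flatMap pvPieceB = pvRecB p l := by
  induction l generalizing p with
  | nil => rfl
  | cons t ts ih => simp only [List.map_cons, List.zip_cons_cons, List.flatMap_cons, pvRecB, ih]

-- pvStepA on the initial state, in closed form (definitional)
lemma pv_stepA_first (t : String) :
    pvStepA ([], "", true) t =
      ((if pvIsPunctuation (pvNormB t) then PySem.List.slice ([] : List String) none (some (-1)) else [])
         ++ [pvCapitalize (pvNormB t), pvGetBuffer (pvCapitalize (pvNormB t))],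
       pvCapitalize (pvNormB t), false) := by
  simp only [pvStepA, pvNormB, pvCapital, Bool.true_or, if_true]
  rfl

-- pvStepA on a mid-loop state, in closed form (definitional)
lemma pv_stepA_closed (out : List String) (q : String) (t : String) :
    pvStepA (out, q, false) t =
      ((if pvIsPunctuation (pvNormB t) then PySem.List.slice out none (some (-1)) else out)
         ++ [pvCapb (pvCapital false q (pvNormB t)) (pvNormB t),
             pvGetBuffer (pvCapb (pvCapital false q (pvNormB t)) (pvNormB t))],
       pvCapb (pvCapital false q (pvNormB t)) (pvNormB t), false) := rfl

-- the main loop correspondence: A's fold from a mid-loop state (content L plus the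
-- pending buffer, prev = possibly-capitalized normalized prev) produces the content
-- of L followed by B's remaining pieces, plus a final pending buffer
lemma pv_loop (ts : List String) :
    ∀ (L : List String) (p : String) (b : Bool),
    ∃ (M : List String) (p' : String) (b' : Bool),
      ts.foldl pvStepA (L ++ [pvGetBuffer (pvCapb b p)], pvCapb b p, false)
        = (M ++ [pvGetBuffer (pvCapb b' p')], pvCapb b' p', false)
      ∧ pvFlat M = pvFlat L ++ pvFlat (pvRecB p (ts.map pvNormB)) := by
  induction ts with
  | nil =>
    intro L p b
    exact ⟨L, p, b, rfl, by simp [pvRecB, pvFlat]⟩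
  | cons t rest ih =>
    intro L p b
    rw [List.foldl_cons, pv_stepA_closed, pv_capital_capb b p]
    set t1 := pvNormB t with ht1
    set memb := (p == "." || p == "?" || p == "!" || p == "\n\n") with hmemb
    set X := (if pvIsPunctuation t1 = true
        then PySem.List.slice (L ++ [pvGetBuffer (pvCapb b p)]) none (some (-1))
        else L ++ [pvGetBuffer (pvCapb b p)]) with hX
    rw [show X ++ [pvCapb memb t1, pvGetBuffer (pvCapb memb t1)]
        = (X ++ [pvCapb memb t1]) ++ [pvGetBuffer (pvCapb memb t1)] by
      rw [List.append_assoc]; rfl]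
    obtain ⟨M, p', b', h1, h2⟩ := ih (X ++ [pvCapb memb t1]) t1 memb
    refine ⟨M, p', b', h1, ?_⟩
    rw [h2]
    have hrec : pvRecB p ((t :: rest).map pvNormB)
        = pvPieceB (some p, t1) ++ pvRecB t1 (rest.map pvNormB) := by
      simp [pvRecB, ht1]
    rw [hrec, pv_flat_append, pv_flat_append, ← List.append_assoc]
    have hhead : pvFlat X ++ pvFlat [pvCapb memb t1]
        = pvFlat L ++ pvFlat (pvPieceB (some p, t1)) := by
      have hpiece : pvPieceB (some p, t1)
          = if pvIsPunctuation t1 then [pvCapb memb t1] else [pvSepB p, pvCapb memb t1] := by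
        simp only [pvPieceB, pvIsPunctuation, hmemb, pvCapb]
      rw [hpiece]
      by_cases hq : pvIsPunctuation t1 = true
      · rw [hX, if_pos hq, if_pos hq, pv_slice_dropLast, List.dropLast_concat]
      · rw [hX, if_neg hq, if_neg hq, pv_buf_capb]
        have hsep : pvGetBuffer p = pvSepB p := rfl
        simp [pvFlat, hsep]
    rw [hhead]

-- ===== VERDICT (by name: the statement is the Claim_ definition above) =====
theorem textify_spec : Claim_equal_textify := by
  intro tokens _
  unfold Spec_textify textify textify_alt
  cases tokens with
  | nil => rfl
  | cons t rest =>
    rw [List.foldl_cons, pv_stepA_first]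
    have h0 : (if pvIsPunctuation (pvNormB t) = true
        then PySem.List.slice ([] : List String) none (some (-1)) else []) = ([] : List String) := by
      rw [pv_slice_dropLast]; simp
    rw [h0]
    have hsh : ((([] : List String) ++ [pvCapitalize (pvNormB t), pvGetBuffer (pvCapitalize (pvNormB t))],
          pvCapitalize (pvNormB t), false) : List String × String × Bool)
        = ([pvCapb true (pvNormB t)] ++ [pvGetBuffer (pvCapb true (pvNormB t))],
           pvCapb true (pvNormB t), false) := rfl
    rw [hsh]
    obtain ⟨M, p', b', h1, h2⟩ := pv_loop rest [pvCapb true (pvNormB t)] (pvNormB t) true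
    rw [h1]
    have hB : ((none :: ((t :: rest).map pvNormB).map some).zip ((t :: rest).map pvNormB)).flatMap pvPieceB
        = [pvCapitalize (pvNormB t)] ++ pvRecB (pvNormB t) (rest.map pvNormB) := by
      simp only [List.map_cons, List.zip_cons_cons, List.flatMap_cons,
        pv_zip_eq_recB (rest.map pvNormB) (pvNormB t)]
      rfl
    show PySem.Str.strip (PySem.Str.join "" (M ++ [pvGetBuffer (pvCapb b' p')]))
        = PySem.Str.strip (PySem.Str.join "" (((none :: ((t :: rest).map pvNormB).map some).zip
            ((t :: rest).map pvNormB)).flatMap pvPieceB))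
    rw [hB]
    have hAlist : (PySem.Str.join "" (M ++ [pvGetBuffer (pvCapb b' p')])).toList
        = pvFlat M ++ (pvGetBuffer (pvCapb b' p')).toList := by
      rw [pv_join_eq_flat, pv_flat_append]; simp [pvFlat]
    simp only [PySem.Str.strip]
    rw [hAlist, pv_strip_append_ws _ _ (pv_buffer_ws _), h2,
      pv_join_eq_flat, pv_flat_append]
    rfl
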